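-- pv_equiv track=rewrite | github.com/evandrix/Splat | _modules/PEAK-0.5a3/PEAK-0.5a3/src/peak/util/columns.py | lsFormat
-- ===== SOURCE A (Python) =====
-- def lsFormat(width, items, colsize=16, sort=True, reverse=False):
--     """utility for things that want to print ls-like columnar output"""
--
--     items = list(items) # don't modify the original list!
--
--     if not items:
--         return
--
--     if sort:
--         items.sort()
--
--     if reverse:
--         items.reverse()
--
--     # Truncate items to available width
--     items = [
--         len(item) >= width and item[:width-4]+'...' or item
--         for item in items
--     ]
--
--     maxlen = max([len(item) for item in items])+1
--     maxlen = max(maxlen,colsize)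
--     cols, leftover = divmod(width,maxlen)
--     cols = min(cols,len(items))
--     colwidth,leftover = divmod(width,cols)
--     rows,    leftover = divmod(len(items), cols)
--     if leftover:
--         rows += 1
--         items.extend((cols-leftover)*[''])
--
--     grid = []
--     for i in range(cols):
--         grid.append(items[i*rows:(i+1)*rows])
--
--     grid = zip(*grid)
--     for row in grid:
--         yield ''.join([item.ljust(colwidth) for item in row]).rstrip()+'\n'
-- ===== SOURCE B (Python) =====
-- def lsFormat(width, items, colsize=16, sort=True, reverse=False):
--     """ls-like columnar output, computed row-by-row via index arithmetic
--     (no intermediate column grid, no transpose, no padding list)."""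
--     items = sorted(items) if sort else list(items)
--     if reverse:
--         items.reverse()
--     if not items:
--         return
--     items = [it[:width - 4] + '...' if len(it) >= width else it
--              for it in items]
--     n = len(items)
--     maxlen = max(colsize, max(len(it) for it in items) + 1)
--     cols = min(width // maxlen, n)
--     colwidth = width // cols
--     rows = -(-n // cols)          # ceiling division
--     for r in range(rows):
--         line = ''.join(
--             (items[c * rows + r] if c * rows + r < n else '').ljust(colwidth)
--             for c in range(cols))
--         yield line.rstrip() + '\n'
-- ===== Notes on version B (the rewrite author's own statement) =====
-- stated objective: simpler
-- what changed: B keeps the layout arithmetic but emits each output row directly by index arithmetic (item c*rows+r, ceiling division for rows), eliminating A's padded item list, the list of column slices and the zip(*grid) transpose.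
import Mathlib
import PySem

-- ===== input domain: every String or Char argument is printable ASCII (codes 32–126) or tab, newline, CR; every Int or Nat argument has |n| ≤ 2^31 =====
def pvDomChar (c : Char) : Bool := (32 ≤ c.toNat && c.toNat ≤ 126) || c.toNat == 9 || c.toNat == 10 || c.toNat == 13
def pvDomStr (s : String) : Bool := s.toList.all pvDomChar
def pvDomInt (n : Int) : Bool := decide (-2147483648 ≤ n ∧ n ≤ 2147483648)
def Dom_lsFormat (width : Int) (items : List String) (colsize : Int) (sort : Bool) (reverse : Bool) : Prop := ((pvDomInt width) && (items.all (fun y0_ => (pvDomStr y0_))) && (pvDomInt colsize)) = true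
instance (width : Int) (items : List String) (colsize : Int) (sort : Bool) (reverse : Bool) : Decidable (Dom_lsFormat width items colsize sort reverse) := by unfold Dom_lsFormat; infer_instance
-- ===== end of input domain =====

-- B re-implements the row emission: instead of building the list of column slices and
-- transposing it with zip(*grid), it computes each output row directly by index
-- arithmetic (item c*rows+r), with ceiling division for rows and no padding list.

-- shared helpers for Python built-ins / the identical truncation expression of both sources
-- str.ljust(w): pad on the right with spaces (exact: no-op when w <= len)
def pyLjust (s : String) (w : Int) : List Char :=
  s.toList ++ List.replicate (w - (s.toList.length : Int)).toNat ' '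

-- 'len(item) >= width and item[:width-4]+"..." or item' — the truncated string ends in
-- '...' and is never empty/falsy, so the and/or idiom is exactly this if/else (both sources)
def lsTrunc (width : Int) (it : String) : String :=
  if (it.toList.length : Int) ≥ width then
    String.ofList (PySem.List.slice it.toList none (some (width - 4)) ++ ['.', '.', '.'])
  else it

-- ===== PORT A =====
-- zip(*g): tuples of the elements at each index, truncated at the shortest list; zip() = []
def zipStar (g : List (List String)) : List (List String) :=
  match g with
  | [] => []
  | c :: cs =>
      (List.range ((cs.map List.length).foldl min c.length)).map
        (fun r => (c :: cs).map (fun col => col.getD r ""))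

def lsFormat (width : Int) (items : List String) (colsize : Int) (sort : Bool) (reverse : Bool) : List String :=
  if items.isEmpty then [] else
  let items1 := if sort then PySem.List.sorted items (fun x => x) false else items
  let items2 := if reverse then items1.reverse else items1
  let items3 := items2.map (lsTrunc width)
  let maxlen0 := (PySem.List.max? (items3.map (fun it => (it.toList.length : Int))) (fun x => x)).getD 0 + 1
  let maxlen := max maxlen0 colsize
  let cols0 := PySem.Int.floordiv width maxlen
  let cols := min cols0 (items3.length : Int)
  if cols = 0 then [] else          -- divmod(width, 0): ZeroDivisionError, outside Pre_
  let colwidth := PySem.Int.floordiv width cols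
  let rows0 := PySem.Int.floordiv (items3.length : Int) cols
  let leftover := PySem.Int.mod (items3.length : Int) cols
  let rows := if leftover ≠ 0 then rows0 + 1 else rows0
  let items4 := if leftover ≠ 0 then items3 ++ List.replicate (cols - leftover).toNat "" else items3
  let grid := (PySem.List.pyRange 0 cols 1).map
      (fun i => PySem.List.slice items4 (some (i * rows)) (some ((i + 1) * rows)))
  (zipStar grid).map
    (fun row => String.ofList (PySem.Chars.rstrip ((row.map (fun it => pyLjust it colwidth)).flatten) ++ ['\n']))

-- ===== PORT B =====
def lsFormat_alt (width : Int) (items : List String) (colsize : Int) (sort : Bool) (reverse : Bool) : List String :=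
  let its := if sort then PySem.List.sorted items (fun x => x) false else items
  let its := if reverse then its.reverse else its
  if its.isEmpty then [] else
  let its := its.map (lsTrunc width)
  let n : Int := its.length
  let maxlen := max colsize ((PySem.List.max? (its.map (fun it => (it.toList.length : Int))) (fun x => x)).getD 0 + 1)
  let cols := min (PySem.Int.floordiv width maxlen) n
  if cols = 0 then [] else          -- width // 0: ZeroDivisionError, outside Pre_
  let colwidth := PySem.Int.floordiv width cols
  let rows := -(PySem.Int.floordiv (-n) cols)      -- ceiling division
  (PySem.List.pyRange 0 rows 1).map (fun r =>
    String.ofList (PySem.Chars.rstrip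
      (((PySem.List.pyRange 0 cols 1).map (fun c =>
          pyLjust (if c * rows + r < n then PySem.List.pyGetD its (c * rows + r) "" else "") colwidth)).flatten)
      ++ ['\n']))

-- ===== PRECONDITION & SPEC =====
-- Pre_ excludes exactly the inputs where Python A raises ZeroDivisionError (cols == 0 in
-- divmod(width, cols)): a nonempty list with 0 <= width < the computed column width maxlen.
def Pre_lsFormat (width : Int) (items : List String) (colsize : Int) (sort : Bool) (reverse : Bool) : Prop :=
  items = [] ∨ width < 0 ∨
    max ((PySem.List.max? ((items.map (lsTrunc width)).map (fun it => (it.toList.length : Int))) (fun x => x)).getD 0 + 1) colsize ≤ width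

instance (width : Int) (items : List String) (colsize : Int) (sort : Bool) (reverse : Bool) : Decidable (Pre_lsFormat width items colsize sort reverse) := by unfold Pre_lsFormat; infer_instance

def pvWitness_lsFormat : Int × List String × Int × Bool × Bool := (40, ["beta", "alpha", "gamma"], 16, true, false)

def Spec_lsFormat (width : Int) (items : List String) (colsize : Int) (sort : Bool) (reverse : Bool) (out : List String) : Prop := out = lsFormat_alt width items colsize sort reverse
instance (width : Int) (items : List String) (colsize : Int) (sort : Bool) (reverse : Bool) (out : List String) : Decidable (Spec_lsFormat width items colsize sort reverse out) := by unfold Spec_lsFormat; infer_instance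

-- ===== CLAIM (what is proved, stated in full; the proofs are below) =====
def Claim_equal_lsFormat : Prop := ∀ (width : Int) (items : List String) (colsize : Int) (sort : Bool) (reverse : Bool), Dom_lsFormat width items colsize sort reverse → Pre_lsFormat width items colsize sort reverse → Spec_lsFormat width items colsize sort reverse (lsFormat width items colsize sort reverse)

-- ===== LEMMAS AND PROOFS =====

-- min-fold over columns of equal length
theorem foldl_min_const (cs : List (List String)) (L : Nat) (h : ∀ c ∈ cs, c.length = L) :
    (cs.map List.length).foldl min L = L := by
  induction cs with
  | nil => rfl
  | cons c cs ih =>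
      have hc : c.length = L := h c (by simp)
      simp only [List.map_cons, List.foldl_cons, hc, min_self]
      exact ih (fun d hd => h d (by simp [hd]))

-- zip(*g) when every column has the same length L
theorem zipStar_eq (g : List (List String)) (L : Nat) (hg : g ≠ []) (h : ∀ c ∈ g, c.length = L) :
    zipStar g = (List.range L).map (fun r => g.map (fun col => col.getD r "")) := by
  obtain ⟨c, cs, rfl⟩ := List.exists_cons_of_ne_nil hg
  have hc : c.length = L := h c (by simp)
  have hz : zipStar (c :: cs) = (List.range ((cs.map List.length).foldl min c.length)).map
      (fun r => (c :: cs).map (fun col => col.getD r "")) := rfl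
  rw [hz, hc, foldl_min_const cs L (fun d hd => h d (by simp [hd]))]

-- getD through the padding with empty strings
theorem getD_pad (l : List String) (p idx : Nat) :
    (l ++ List.replicate p "").getD idx "" = if idx < l.length then l.getD idx "" else "" := by
  by_cases hidx : idx < l.length
  · simp [hidx, List.getD_eq_getElem?_getD, List.getElem?_append_left hidx]
  · simp only [hidx, if_false]
    rw [List.getD_eq_getElem?_getD, List.getElem?_append_right (by omega)]
    rcases Nat.lt_or_ge (idx - l.length) p with hlt | hge
    · simp [hlt]
    · simp [List.getElem?_eq_none (show (List.replicate p ("" : String)).length ≤ idx - l.length by simpa using hge)]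

-- getD of a slice [A : A+R] at r < R, inside the list
theorem slice_getD (P : List String) (A R r : Nat) (hr : r < R) :
    (PySem.List.slice P (some (A : Int)) (some ((A : Int) + (R : Int)))).getD r "" = P.getD (A + r) "" := by
  rw [PySem.List.slice_natCast_add]
  simp [List.getD_eq_getElem?_getD, hr, List.getElem?_drop]

theorem slice_len (P : List String) (A R : Nat) (hlen : A + R ≤ P.length) :
    (PySem.List.slice P (some (A : Int)) (some ((A : Int) + (R : Int)))).length = R := by
  rw [PySem.List.slice_natCast_add]
  simp only [List.length_take, List.length_drop]
  omega

-- the core layout equality, after the two ports have agreed on items3/maxlen/cols/colwidth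
theorem core_eq (items3 : List String) (cols colwidth : Int)
    (hn : items3 ≠ []) (hcols : cols ≠ 0) (hle : cols ≤ (items3.length : Int)) :
    (let n : Int := items3.length
     let rows0 := PySem.Int.floordiv n cols
     let leftover := PySem.Int.mod n cols
     let rows := if leftover ≠ 0 then rows0 + 1 else rows0
     let items4 := if leftover ≠ 0 then items3 ++ List.replicate (cols - leftover).toNat "" else items3
     let grid := (PySem.List.pyRange 0 cols 1).map
        (fun i => PySem.List.slice items4 (some (i * rows)) (some ((i + 1) * rows)))
     (zipStar grid).map
       (fun row => String.ofList (PySem.Chars.rstrip ((row.map (fun it => pyLjust it colwidth)).flatten) ++ ['\n'])))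
    =
    (let n : Int := items3.length
     let rows := -(PySem.Int.floordiv (-n) cols)
     (PySem.List.pyRange 0 rows 1).map (fun r =>
       String.ofList (PySem.Chars.rstrip
         (((PySem.List.pyRange 0 cols 1).map (fun c =>
             pyLjust (if c * rows + r < n then PySem.List.pyGetD items3 (c * rows + r) "" else "") colwidth)).flatten)
         ++ ['\n']))) := by
  have hn1 : (1 : Int) ≤ (items3.length : Int) := by
    have := List.length_pos_of_ne_nil hn
    omega
  rcases lt_or_gt_of_ne hcols with hneg | hpos
  · -- cols < 0: both ranges are empty, both outputs are []
    have hA : PySem.List.pyRange 0 cols 1 = [] := PySem.List.pyRange_one_eq_nil (by omega)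
    have hq : 0 ≤ PySem.Int.floordiv (-(items3.length : Int)) cols := by
      by_contra hq
      rw [Int.not_le] at hq
      have heq := PySem.Int.floordiv_mul_add_mod (-(items3.length : Int)) cols
      have hb := PySem.Int.mod_neg_bounds (-(items3.length : Int)) hneg
      nlinarith [hb.1, hb.2]
    have hB : PySem.List.pyRange 0 (-(PySem.Int.floordiv (-(items3.length : Int)) cols)) 1 = [] :=
      PySem.List.pyRange_one_eq_nil (by omega)
    simp only [hA, hB, List.map_nil]
    rfl
  · -- the main case: 1 ≤ cols
    simp only []
    set n : Int := (items3.length : Int) with hdefn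
    set q := PySem.Int.floordiv n cols with hdefq
    set m := PySem.Int.mod n cols with hdefm
    have hqm : q * cols + m = n := PySem.Int.floordiv_mul_add_mod n cols
    have hm0 : 0 ≤ m := PySem.Int.mod_nonneg n hpos
    have hmlt : m < cols := PySem.Int.mod_lt n hpos
    have hcq : cols * q = n - m := by
      have h := mul_comm cols q
      linarith [hqm]
    have hq1 : 1 ≤ q := by nlinarith
    set rows := if m ≠ 0 then q + 1 else q with hdefrows
    have hrows1 : 1 ≤ rows := by
      rw [hdefrows]; split <;> omega
    have hrowsprod : n ≤ cols * rows ∧ cols * rows - n = (if m ≠ 0 then cols - m else 0) := by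
      rw [hdefrows]
      by_cases hm : m = 0
      · simp only [hm, ne_eq, not_true_eq_false, if_false]
        constructor <;> linarith [hcq]
      · have hm1 : 1 ≤ m := by omega
        have hexp : cols * (q + 1) = cols * q + cols := by ring
        simp only [ne_eq, hm, not_false_eq_true, if_true]
        constructor <;> linarith [hcq, hexp]
    have hB : -(PySem.Int.floordiv (-n) cols) = rows := by
      rw [PySem.Int.neg_floordiv_neg_eq_iff_of_pos hpos]
      rw [hdefrows]
      by_cases hm : m = 0
      · simp only [hm, ne_eq, not_true_eq_false, if_false]
        have hexp : (q - 1) * cols = q * cols - cols := by ring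
        constructor <;> linarith [hqm, hexp]
      · have hm1 : 1 ≤ m := by omega
        have hexp : (q + 1 - 1) * cols = q * cols := by ring
        have hexp2 : (q + 1) * cols = q * cols + cols := by ring
        simp only [ne_eq, hm, not_false_eq_true, if_true]
        constructor <;> linarith [hqm, hexp, hexp2]
    rw [hB]
    -- the padded list and its length
    set P := (if m ≠ 0 then items3 ++ List.replicate (cols - m).toNat "" else items3) with hdefP
    have hP : P = items3 ++ List.replicate (cols * rows - n).toNat "" := by
      rw [hdefP]
      by_cases hm : m = 0
      · simp only [hm, ne_eq, not_true_eq_false, if_false]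
        have h2 := hrowsprod.2
        simp only [hm, ne_eq, not_true_eq_false, if_false] at h2
        have h0 : (cols * rows - n).toNat = 0 := by omega
        rw [h0, List.replicate_zero, List.append_nil]
      · simp only [ne_eq, hm, not_false_eq_true, if_true]
        have h2 := hrowsprod.2
        simp only [ne_eq, hm, not_false_eq_true, if_true] at h2
        rw [h2]
    have hPlen : (P.length : Int) = cols * rows := by
      rw [hP]
      simp only [List.length_append, List.length_replicate]
      push_cast
      omega
    -- move to Nat-valued column/row counts
    set C := cols.toNat with hdefC
    set R := rows.toNat with hdefR
    have hCcast : (C : Int) = cols := by omega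
    have hRcast : (R : Int) = rows := by omega
    have hC1 : 1 ≤ C := by omega
    have hR1 : 1 ≤ R := by omega
    have hPlenN : P.length = C * R := by
      have : ((C * R : Nat) : Int) = cols * rows := by push_cast; rw [hCcast, hRcast]
      omega
    -- both ranges become List.range
    have hrangeC : PySem.List.pyRange 0 cols 1 = (List.range C).map (fun (k : Nat) => (k : Int)) := by
      rw [PySem.List.pyRange_one]
      simp only [sub_zero, zero_add]
      rw [← hdefC]
    have hrangeR : PySem.List.pyRange 0 rows 1 = (List.range R).map (fun (k : Nat) => (k : Int)) := by
      rw [PySem.List.pyRange_one]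
      simp only [sub_zero, zero_add]
      rw [← hdefR]
    rw [hrangeC, hrangeR, List.map_map, List.map_map]
    -- A's grid, with columns indexed by k < C
    have hgrid : ((List.range C).map ((fun i => PySem.List.slice P (some (i * rows)) (some ((i + 1) * rows))) ∘ (fun (k : Nat) => (k : Int))))
        = (List.range C).map (fun k => PySem.List.slice P (some ((k * R : Nat) : Int)) (some (((k * R : Nat) : Int) + (R : Int)))) := by
      apply List.map_congr_left
      intro k _
      simp only [Function.comp]
      congr 1
      · congr 1; push_cast; rw [hRcast]
      · congr 1; push_cast; rw [hRcast]; ring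
    rw [hgrid]
    have hcollen : ∀ c ∈ (List.range C).map (fun k => PySem.List.slice P (some ((k * R : Nat) : Int)) (some (((k * R : Nat) : Int) + (R : Int)))), c.length = R := by
      intro c hc
      rw [List.mem_map] at hc
      obtain ⟨k, hk, rfl⟩ := hc
      rw [List.mem_range] at hk
      refine slice_len P (k * R) R ?_
      rw [hPlenN]
      calc k * R + R = (k + 1) * R := by ring
        _ ≤ C * R := Nat.mul_le_mul_right R hk
    rw [zipStar_eq _ R (by simp only [ne_eq, List.map_eq_nil_iff, List.range_eq_nil]; omega) hcollen]
    rw [List.map_map]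
    apply List.map_congr_left
    intro r hr
    rw [List.mem_range] at hr
    simp only [Function.comp]
    congr 1
    congr 1
    congr 1
    rw [List.map_map, List.map_map, List.map_map]
    congr 1
    apply List.map_congr_left
    intro k hk
    simp only [Function.comp]
    rw [List.mem_range] at hk
    -- per-element: A reads the padded list through the slice, B indexes items3 directly
    rw [slice_getD P (k * R) R r hr]
    congr 1
    have hidxcast : (k : Int) * rows + (r : Int) = ((k * R + r : Nat) : Int) := by
      push_cast; rw [hRcast]
    rw [hidxcast, hP, getD_pad]
    by_cases hlt : k * R + r < items3.length
    · rw [if_pos hlt, if_pos (by rw [hdefn]; exact_mod_cast hlt),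
        PySem.List.pyGetD_of_nonneg items3 "" (by positivity)]
      rw [List.getD_eq_getElem?_getD, List.getD_eq_getElem?_getD, Int.toNat_natCast]
    · rw [if_neg hlt, if_neg (by omega)]

-- ===== VERDICT (by name: the statement is the Claim_ definition above) =====
theorem lsFormat_spec : Claim_equal_lsFormat := by
  intro width items colsize sort reverse _ _
  unfold Spec_lsFormat lsFormat lsFormat_alt
  by_cases h0 : items.isEmpty
  · simp at h0
    subst h0
    simp [PySem.List.sorted]
  · have h0' : (if reverse then (if sort then PySem.List.sorted items (fun x => x) false else items).reverse else (if sort then PySem.List.sorted items (fun x => x) false else items)).isEmpty = false := by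
      rcases List.exists_cons_of_ne_nil (by simpa using h0) with ⟨a, t, rfl⟩
      rcases reverse <;> rcases sort <;>
        simp [List.isEmpty_eq_false_iff, PySem.List.sorted_eq_nil_iff]
    simp only [h0, h0', Bool.false_eq_true, if_false]
    set items2 := (if reverse then (if sort then PySem.List.sorted items (fun x => x) false else items).reverse else (if sort then PySem.List.sorted items (fun x => x) false else items)) with hitems2
    set items3 := items2.map (lsTrunc width) with hitems3
    have hne : items3 ≠ [] := by
      simp only [hitems3, ne_eq, List.map_eq_nil_iff]
      simpa [List.isEmpty_eq_false_iff] using h0'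
    rw [max_comm ((PySem.List.max? (items3.map fun it => (it.toList.length : Int)) fun x => x).getD 0 + 1) colsize]
    set maxlen := max colsize ((PySem.List.max? (items3.map fun it => (it.toList.length : Int)) fun x => x).getD 0 + 1) with hmaxlen
    set cols := min (PySem.Int.floordiv width maxlen) (items3.length : Int) with hcols
    by_cases hc0 : cols = 0
    · simp [hc0]
    · simp only [hc0, if_false]
      exact core_eq items3 cols (PySem.Int.floordiv width cols) hne hc0 (min_le_right _ _)
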